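-- pv_equiv track=rewrite | github.com/CMarcoBioinfo/TRGT_Clinical_Parser | scripts/bio/motifs_orientation.py | rc_segmentation
-- ===== SOURCE A (Python) =====
-- def rc_segmentation(seq, motifs_str):
--     if not seq or not motifs_str:
--         return ""
--
--     # Liste TRGT (ordre original)
--     motifs = motifs_str.split(",")
--
--     # Liste triée pour matcher (mais on garde l’index TRGT)
--     motifs_sorted = sorted(
--         [(m, motifs.index(m)) for m in motifs],
--         key=lambda x: len(x[0]),
--         reverse=True
--     )
--
--     ms = []
--     i = 0
--     n = len(seq)
--
--     while i < n:
--         matched = False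
--
--         for motif, trgt_idx in motifs_sorted:
--             m = len(motif)
--
--             if seq.startswith(motif, i):
--                 start = i
--                 i += m
--
--                 while i < n and seq.startswith(motif, i):
--                     i += m
--
--                 end = i
--                 ms.append((trgt_idx, start, end))
--                 matched = True
--                 break
--
--         if not matched:
--             i += 1
--
--     if not ms:
--         return ""
--
--     return "_".join(f"{idx}({start}-{end})" for idx, start, end in ms)
-- ===== SOURCE B (Python) =====
-- def rc_segmentation(seq, motifs_str):
--     if not seq or not motifs_str:
--         return ""
--
--     motifs = motifs_str.split(",")
--
--     # first index of each distinct motif (TRGT index), hash lookup replaces startswith scans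
--     index_of = {}
--     for j, m in enumerate(motifs):
--         if m not in index_of:
--             index_of[m] = j
--
--     # distinct motif lengths, longest first
--     lengths = sorted({len(m) for m in motifs}, reverse=True)
--
--     n = len(seq)
--     parts = []
--     i = 0
--     while i < n:
--         found = False
--         for L in lengths:
--             if i + L <= n:
--                 piece = seq[i:i + L]
--                 idx = index_of.get(piece)
--                 if idx is not None:
--                     start = i
--                     i += L
--                     while seq[i:i + L] == piece:
--                         i += L
--                     parts.append("%d(%d-%d)" % (idx, start, i))
--                     found = True
--                     break
--         if not found:
--             i += 1
--
--     return "_".join(parts)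
-- ===== Notes on version B (the rewrite author's own statement) =====
-- stated objective: faster
-- what changed: Instead of scanning the whole length-sorted motif list with startswith at every position, B builds a motif->first-index hash map once and probes seq[i:i+L] for each distinct motif length L (longest first), so the per-position cost depends on the number of distinct lengths, not the number of motifs.
-- outside the precondition, e.g. on rc_segmentation('AB', 'AB,'): A returns '0(0-2)', B returns '0(0-2)'
import Mathlib
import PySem

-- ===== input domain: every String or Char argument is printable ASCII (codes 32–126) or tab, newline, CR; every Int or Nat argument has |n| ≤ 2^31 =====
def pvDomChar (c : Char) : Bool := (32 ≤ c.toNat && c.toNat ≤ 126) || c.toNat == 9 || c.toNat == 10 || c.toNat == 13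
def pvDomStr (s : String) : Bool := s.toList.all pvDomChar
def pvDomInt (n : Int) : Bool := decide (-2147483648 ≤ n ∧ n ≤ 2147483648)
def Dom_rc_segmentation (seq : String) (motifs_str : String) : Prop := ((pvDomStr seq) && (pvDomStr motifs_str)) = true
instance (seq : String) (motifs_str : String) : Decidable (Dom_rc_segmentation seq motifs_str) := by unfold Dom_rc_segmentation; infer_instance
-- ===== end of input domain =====

-- B replaces A's per-position startswith scan over the length-sorted motif list by one hash lookup
-- of the slice seq[i:i+L] per distinct motif length L; equal RETURN values proved under Pre_.

-- f"{idx}({start}-{end})" (A) = "%d(%d-%d)" % (idx, start, i) (B)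
def pvFmt (t : Int × Nat × Nat) : List Char :=
  PySem.Int.toChars t.1 ++ '(' :: (PySem.Int.toChars (t.2.1 : Int) ++ '-' :: (PySem.Int.toChars (t.2.2 : Int) ++ [')']))

-- ===== PORT A =====
-- seq.startswith(motif, i) for a nonnegative i: Python compares motif against seq[i:i+len(motif)] — exact here
def pvStartsAt (s m : List Char) (i : Nat) : Bool := m.isPrefixOf (s.drop i)

-- sorted([(m, motifs.index(m)) for m in motifs], key=lambda x: len(x[0]), reverse=True)
-- (motifs.index(m) always succeeds since m ∈ motifs; getD 0 is never the fallback)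
def pvPairsOf (motifs : List (List Char)) : List (List Char × Int) :=
  PySem.List.sorted (motifs.map (fun m => (m, (((PySem.List.index? motifs m).getD 0 : Nat) : Int))))
    (fun p => p.1.length) true

-- inner loop: while i < n and seq.startswith(motif, i): i += m
def pvRunA (s motif : List Char) (n : Nat) : Nat → Nat → Nat
  | 0, i => i
  | fuel+1, i =>
    if decide (i < n) && pvStartsAt s motif i then pvRunA s motif n fuel (i + motif.length) else i

-- outer while loop of A; the for-with-break over motifs_sorted is find?
def pvLoopA (s : List Char) (P : List (List Char × Int)) (n : Nat) :
    Nat → Nat → List (Int × Nat × Nat) → List (Int × Nat × Nat)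
  | 0, _, acc => acc
  | fuel+1, i, acc =>
    if i < n then
      match P.find? (fun p => pvStartsAt s p.1 i) with
      | some (motif, idx) =>
          let i' := pvRunA s motif n (n+1) (i + motif.length)
          pvLoopA s P n fuel i' (acc ++ [(idx, i, i')])
      | none => pvLoopA s P n fuel (i+1) acc
    else acc

def rc_segmentation (seq : String) (motifs_str : String) : String :=
  if seq = "" || motifs_str = "" then "" else
  let s := seq.toList
  let motifs := PySem.Chars.splitOn motifs_str.toList [',']
  let sortedPairs := pvPairsOf motifs
  let n := s.length
  let ms := pvLoopA s sortedPairs n (n+1) 0 []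
  if ms = [] then "" else String.ofList (PySem.Chars.join ['_'] (ms.map pvFmt))

-- ===== PORT B =====
-- index_of: for j, m in enumerate(motifs): if m not in index_of: index_of[m] = j
def pvDictOf (motifs : List (List Char)) : PySem.Dict (List Char) Int :=
  (PySem.List.enumerate motifs 0).foldl
    (fun d p => if d.contains p.2 then d else d.insert p.2 p.1) PySem.Dict.empty

-- lengths = sorted({len(m) for m in motifs}, reverse=True)
def pvLengthsOf (motifs : List (List Char)) : List Nat :=
  PySem.List.sorted (PySem.Set.ofList (motifs.map (·.length))) (fun L => L) true

-- for L in lengths: if i+L <= n: piece = seq[i:i+L]; idx = index_of.get(piece); if idx is not None: break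
def pvFindLen (s : List Char) (d : PySem.Dict (List Char) Int) (n i : Nat) :
    List Nat → Option (Nat × List Char × Int)
  | [] => none
  | L :: rest =>
    if i + L ≤ n then
      match d.get? (PySem.Chars.slice s (some (i : Int)) (some ((i + L : Nat) : Int))) with
      | some idx => some (L, PySem.Chars.slice s (some (i : Int)) (some ((i + L : Nat) : Int)), idx)
      | none => pvFindLen s d n i rest
    else pvFindLen s d n i rest

-- while seq[i:i+L] == piece: i += L
def pvRunB (s piece : List Char) (L : Nat) : Nat → Nat → Nat
  | 0, i => i
  | fuel+1, i =>
    if PySem.Chars.slice s (some (i : Int)) (some ((i + L : Nat) : Int)) = piece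
    then pvRunB s piece L fuel (i + L) else i

def pvLoopB (s : List Char) (d : PySem.Dict (List Char) Int) (lengths : List Nat) (n : Nat) :
    Nat → Nat → List (List Char) → List (List Char)
  | 0, _, parts => parts
  | fuel+1, i, parts =>
    if i < n then
      match pvFindLen s d n i lengths with
      | some (L, piece, idx) =>
          let i' := pvRunB s piece L (n+1) (i + L)
          pvLoopB s d lengths n fuel i' (parts ++ [pvFmt (idx, i, i')])
      | none => pvLoopB s d lengths n fuel (i+1) parts
    else parts

def rc_segmentation_alt (seq : String) (motifs_str : String) : String :=
  if seq = "" || motifs_str = "" then "" else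
  let s := seq.toList
  let motifs := PySem.Chars.splitOn motifs_str.toList [',']
  let d := pvDictOf motifs
  let lengths := pvLengthsOf motifs
  let n := s.length
  String.ofList (PySem.Chars.join ['_'] (pvLoopB s d lengths n (n+1) 0 []))

-- ===== PRECONDITION & SPEC =====
-- Pre_ excludes motif strings with an empty component (leading/trailing/double comma) when seq is nonempty:
-- there the Python A enters an infinite loop as soon as the zero-length motif is selected at some position
-- (and on the rare such inputs where every position is covered by nonempty motifs, so that A does return, B returns the same string).
def Pre_rc_segmentation (seq : String) (motifs_str : String) : Prop :=
  seq = "" ∨ motifs_str = "" ∨ [] ∉ PySem.Chars.splitOn motifs_str.toList [',']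
instance (seq : String) (motifs_str : String) : Decidable (Pre_rc_segmentation seq motifs_str) := by
  unfold Pre_rc_segmentation; infer_instance

def pvWitness_rc_segmentation : String × String := ("ACGACGTT", "ACG,T")

def Spec_rc_segmentation (seq : String) (motifs_str : String) (out : String) : Prop := out = rc_segmentation_alt seq motifs_str
instance (seq : String) (motifs_str : String) (out : String) : Decidable (Spec_rc_segmentation seq motifs_str out) := by unfold Spec_rc_segmentation; infer_instance

-- ===== CLAIM (what is proved, stated in full; the proofs are below) =====
def Claim_equal_rc_segmentation : Prop := ∀ (seq : String) (motifs_str : String), Dom_rc_segmentation seq motifs_str → Pre_rc_segmentation seq motifs_str → Spec_rc_segmentation seq motifs_str (rc_segmentation seq motifs_str)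

-- ===== LEMMAS AND PROOFS =====

-- startswith at i as a slice equation
lemma pvStartsAt_iff (s m : List Char) (i : Nat) (hi : i ≤ s.length) :
    pvStartsAt s m i = true ↔
      i + m.length ≤ s.length ∧
        PySem.Chars.slice s (some (i : Int)) (some ((i + m.length : Nat) : Int)) = m := by
  unfold pvStartsAt
  rw [List.isPrefixOf_iff_prefix]
  simp only [PySem.Chars.slice_eq_listSlice, PySem.List.slice_natCast, Nat.add_sub_cancel_left]
  constructor
  · intro h
    have hlen := h.length_le
    simp only [List.length_drop] at hlen
    refine ⟨by omega, ?_⟩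
    exact (List.prefix_iff_eq_take.mp h).symm
  · rintro ⟨hle, htake⟩
    rw [List.prefix_iff_eq_take, htake]

-- a full-length slice match forces room in s
lemma pvSlice_room (s piece : List Char) (j L : Nat) (hL : piece.length = L) (h1 : 1 ≤ L)
    (h : PySem.Chars.slice s (some (j : Int)) (some ((j + L : Nat) : Int)) = piece) :
    j + L ≤ s.length := by
  simp only [PySem.Chars.slice_eq_listSlice, PySem.List.slice_natCast, Nat.add_sub_cancel_left] at h
  have := congrArg List.length h
  simp only [List.length_take, List.length_drop, hL] at this
  omega

-- the dict built by "if m not in index_of: index_of[m] = j" looks up the FIRST index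
lemma pvDict_get_aux (l : List (List Char)) : ∀ (j : Nat) (d : PySem.Dict (List Char) Int) (m : List Char),
    ((PySem.List.enumerate l (j : Int)).foldl
        (fun d p => if d.contains p.2 then d else d.insert p.2 p.1) d).get? m
      = match d.get? m with
        | some v => some v
        | none => (PySem.List.index? l m).map (fun k => Int.ofNat (j + k)) := by
  induction l with
  | nil =>
    intro j d m
    simp only [PySem.List.enumerate, List.foldl_nil]
    cases d.get? m <;> simp [PySem.List.index?]
  | cons x xs ih =>
    intro j d m
    rw [PySem.List.enumerate_cons]
    have hcast : ((j : Int) + 1) = ((j + 1 : Nat) : Int) := by push_cast; ring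
    rw [List.foldl_cons, hcast]
    by_cases hc : d.contains x = true
    · simp only [hc, if_true]
      rw [ih (j + 1) d m]
      by_cases hm : x = m
      · subst hm
        have : (d.get? x).isSome := by rw [← PySem.Dict.contains_eq_isSome_get?, hc]
        obtain ⟨v, hv⟩ := Option.isSome_iff_exists.mp this
        simp [hv]
      · rw [PySem.List.index?_cons_of_ne xs hm]
        cases d.get? m with
        | some v => simp
        | none =>
          simp only [Option.map_map]
          congr 1
          funext k
          simp only [Function.comp_apply]
          congr 1
          omega
    · simp only [hc, if_false, Bool.false_eq_true]
      rw [ih (j + 1) (d.insert x (j : Int)) m]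
      by_cases hm : x = m
      · subst hm
        rw [PySem.Dict.get?_insert_self]
        have hd : d.get? x = none := by
          cases hdx : d.get? x with
          | none => rfl
          | some v =>
            exact absurd (by rw [PySem.Dict.contains_eq_isSome_get?, hdx]; rfl) hc
        rw [hd, PySem.List.index?_cons_self]
        simp [Int.ofNat_eq_natCast]
      · rw [PySem.Dict.get?_insert_of_ne d ((j : Int)) (Ne.symm hm), PySem.List.index?_cons_of_ne xs hm]
        cases d.get? m with
        | some v => simp
        | none =>
          simp only [Option.map_map]
          congr 1
          funext k
          simp only [Function.comp_apply]
          congr 1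
          omega

lemma pvDict_get (motifs : List (List Char)) (m : List Char) :
    (pvDictOf motifs).get? m = (PySem.List.index? motifs m).map (fun k => Int.ofNat k) := by
  unfold pvDictOf
  have h0 : (0 : Int) = ((0 : Nat) : Int) := rfl
  rw [h0, pvDict_get_aux motifs 0 PySem.Dict.empty m]
  rw [PySem.Dict.get?_empty]
  simp

-- lengths list: strictly descending, membership = some motif has that length
lemma pvLengths_pairwise (motifs : List (List Char)) :
    (pvLengthsOf motifs).Pairwise (fun a b => b ≤ a) :=
  PySem.List.sorted_pairwise_rev _ _

lemma pvLengths_mem (motifs : List (List Char)) (L : Nat) :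
    L ∈ pvLengthsOf motifs ↔ ∃ m ∈ motifs, m.length = L := by
  unfold pvLengthsOf
  rw [PySem.List.mem_sorted, PySem.Set.mem_ofList]
  simp

-- pvFindLen: none means every admissible length misses the dict
lemma pvFindLen_none_iff (s : List Char) (d : PySem.Dict (List Char) Int) (n i : Nat) :
    ∀ ls : List Nat, (pvFindLen s d n i ls = none ↔
      ∀ L ∈ ls, i + L ≤ n →
        d.get? (PySem.Chars.slice s (some (i : Int)) (some ((i + L : Nat) : Int))) = none) := by
  intro ls
  induction ls with
  | nil => simp [pvFindLen]
  | cons L rest ih =>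
    unfold pvFindLen
    by_cases hb : i + L ≤ n
    · simp only [hb, if_true]
      cases hget : d.get? (PySem.Chars.slice s (some (i : Int)) (some ((i + L : Nat) : Int))) with
      | some idx =>
        constructor
        · intro h; exact absurd h (by simp)
        · intro h
          have hnone := h L List.mem_cons_self hb
          rw [hnone] at hget
          cases hget
      | none =>
        rw [ih]
        constructor
        · intro h L' hL' hb'
          rcases List.mem_cons.mp hL' with rfl | hmem
          · exact hget
          · exact h L' hmem hb'
        · intro h L' hL' hb'
          exact h L' (List.mem_cons_of_mem _ hL') hb'
    · simp only [hb, if_false]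
      rw [ih]
      constructor
      · intro h L' hL' hb'
        rcases List.mem_cons.mp hL' with rfl | hmem
        · exact absurd hb' hb
        · exact h L' hmem hb'
      · intro h L' hL' hb'
        exact h L' (List.mem_cons_of_mem _ hL') hb'

-- pvFindLen: a hit is the first (hence, on the sorted list, the longest) admissible length in the dict
lemma pvFindLen_some_spec (s : List Char) (d : PySem.Dict (List Char) Int) (n i : Nat) :
    ∀ ls : List Nat, ls.Pairwise (fun a b => b ≤ a) →
      ∀ L piece idx, pvFindLen s d n i ls = some (L, piece, idx) →
        L ∈ ls ∧ i + L ≤ n ∧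
        piece = PySem.Chars.slice s (some (i : Int)) (some ((i + L : Nat) : Int)) ∧
        d.get? piece = some idx ∧
        ∀ L' ∈ ls, L < L' → i + L' ≤ n →
          d.get? (PySem.Chars.slice s (some (i : Int)) (some ((i + L' : Nat) : Int))) = none := by
  intro ls
  induction ls with
  | nil => intro _ L piece idx h; simp [pvFindLen] at h
  | cons L0 rest ih =>
    intro hpw L piece idx h
    have hpw' := (List.pairwise_cons.mp hpw).2
    have hle : ∀ y ∈ rest, y ≤ L0 := (List.pairwise_cons.mp hpw).1
    unfold pvFindLen at h
    by_cases hb : i + L0 ≤ n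
    · simp only [hb, if_true] at h
      cases hget : d.get? (PySem.Chars.slice s (some (i : Int)) (some ((i + L0 : Nat) : Int))) with
      | some idx0 =>
        rw [hget] at h
        simp only [Option.some.injEq, Prod.mk.injEq] at h
        obtain ⟨rfl, rfl, rfl⟩ := h
        refine ⟨List.mem_cons_self, hb, rfl, hget, ?_⟩
        intro L' hL' hlt _
        rcases List.mem_cons.mp hL' with rfl | hmem
        · omega
        · exact absurd (hle L' hmem) (by omega)
      | none =>
        rw [hget] at h
        obtain ⟨hmem, hb', hpiece, hgot, hmax⟩ := ih hpw' L piece idx h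
        refine ⟨List.mem_cons_of_mem _ hmem, hb', hpiece, hgot, ?_⟩
        intro L' hL' hlt hble
        rcases List.mem_cons.mp hL' with rfl | hmem'
        · exact hget
        · exact hmax L' hmem' hlt hble
    · simp only [hb, if_false] at h
      obtain ⟨hmem, hb', hpiece, hgot, hmax⟩ := ih hpw' L piece idx h
      refine ⟨List.mem_cons_of_mem _ hmem, hb', hpiece, hgot, ?_⟩
      intro L' hL' hlt hble
      rcases List.mem_cons.mp hL' with rfl | hmem'
      · exact absurd hble hb
      · exact hmax L' hmem' hlt hble

-- find? on a key-descending list returns the unique maximal satisfying element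
lemma pvFind?_max {α : Type} (p : α → Bool) (k : α → Nat) :
    ∀ l : List α, l.Pairwise (fun a b => k b ≤ k a) → ∀ a, a ∈ l → p a = true →
      (∀ b ∈ l, p b = true → k b ≤ k a) → (∀ b ∈ l, p b = true → k b = k a → b = a) →
      l.find? p = some a := by
  intro l
  induction l with
  | nil => intro _ a ha; exact absurd ha (List.not_mem_nil)
  | cons x t ih =>
    intro hpw a ha hpa hmax huniq
    by_cases hx : p x = true
    · rw [List.find?_cons_of_pos hx]
      rcases List.mem_cons.mp ha with rfl | hat
      · rfl
      · have h1 : k a ≤ k x := (List.pairwise_cons.mp hpw).1 a hat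
        have h2 : k x ≤ k a := hmax x List.mem_cons_self hx
        exact congrArg some (huniq x List.mem_cons_self hx (by omega))
    · rw [List.find?_cons_of_neg hx]
      have hax : a ≠ x := fun h => hx (h ▸ hpa)
      have hat : a ∈ t := by
        rcases List.mem_cons.mp ha with rfl | hat
        · exact absurd rfl hax
        · exact hat
      exact ih (List.pairwise_cons.mp hpw).2 a hat hpa
        (fun b hb hpb => hmax b (List.mem_cons_of_mem _ hb) hpb)
        (fun b hb hpb => huniq b (List.mem_cons_of_mem _ hb) hpb)

-- membership of the sorted pair list
lemma pvPairs_mem (motifs : List (List Char)) (q : List Char × Int) :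
    q ∈ pvPairsOf motifs ↔
      q.1 ∈ motifs ∧ q.2 = (((PySem.List.index? motifs q.1).getD 0 : Nat) : Int) := by
  unfold pvPairsOf
  rw [PySem.List.mem_sorted]
  constructor
  · intro h
    obtain ⟨m, hm, heq⟩ := List.mem_map.mp h
    cases q
    simp only [Prod.mk.injEq] at heq
    obtain ⟨rfl, rfl⟩ := heq
    exact ⟨hm, rfl⟩
  · intro ⟨h1, h2⟩
    apply List.mem_map.mpr
    exact ⟨q.1, h1, by cases q; simp_all⟩

-- THE STEP EQUALITY: B's length-table lookup computes exactly A's scan over the sorted motif list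
lemma pvStep_eq (s : List Char) (motifs : List (List Char)) (i : Nat) (hi : i ≤ s.length) :
    pvFindLen s (pvDictOf motifs) s.length i (pvLengthsOf motifs)
      = ((pvPairsOf motifs).find? (fun p => pvStartsAt s p.1 i)).map
          (fun p => (p.1.length, p.1, p.2)) := by
  cases hf : pvFindLen s (pvDictOf motifs) s.length i (pvLengthsOf motifs) with
  | none =>
    have hall := (pvFindLen_none_iff s (pvDictOf motifs) s.length i (pvLengthsOf motifs)).mp hf
    rw [List.find?_eq_none.mpr]
    · rfl
    · intro q hq hpq
      obtain ⟨hqm, -⟩ := (pvPairs_mem motifs q).mp hq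
      obtain ⟨hroom, hslice⟩ := (pvStartsAt_iff s q.1 i hi).mp hpq
      have hLmem : q.1.length ∈ pvLengthsOf motifs :=
        (pvLengths_mem motifs q.1.length).mpr ⟨q.1, hqm, rfl⟩
      have hnone := hall q.1.length hLmem hroom
      rw [hslice, pvDict_get] at hnone
      cases hix : PySem.List.index? motifs q.1 with
      | none => exact absurd hqm ((PySem.List.index?_eq_none_iff motifs q.1).mp hix)
      | some k => rw [hix] at hnone; cases hnone
  | some r =>
    obtain ⟨L, piece, idx⟩ := r
    obtain ⟨hLmem, hroom, hpiece, hgot, hmax⟩ :=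
      pvFindLen_some_spec s (pvDictOf motifs) s.length i (pvLengthsOf motifs)
        (pvLengths_pairwise motifs) L piece idx hf
    rw [pvDict_get] at hgot
    obtain ⟨k, hk⟩ : ∃ k, PySem.List.index? motifs piece = some k := by
      cases hix : PySem.List.index? motifs piece with
      | none => rw [hix] at hgot; cases hgot
      | some k => exact ⟨k, rfl⟩
    have hpmem : piece ∈ motifs := by
      rw [← PySem.List.index?_isSome_iff motifs piece, hk]
      rfl
    have hidx : idx = Int.ofNat k := by
      rw [hk] at hgot
      simpa using hgot.symm
    have hplen : piece.length = L := by
      rw [hpiece]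
      simp only [PySem.Chars.slice_eq_listSlice, PySem.List.slice_natCast, Nat.add_sub_cancel_left]
      simp only [List.length_take, List.length_drop]
      omega
    have hfind : (pvPairsOf motifs).find? (fun p => pvStartsAt s p.1 i) = some (piece, idx) := by
      refine pvFind?_max (fun p => pvStartsAt s p.1 i) (fun p => p.1.length)
        (pvPairsOf motifs) ?_ (piece, idx) ?_ ?_ ?_ ?_
      · exact PySem.List.sorted_pairwise_rev _ _
      · refine (pvPairs_mem motifs (piece, idx)).mpr ⟨hpmem, ?_⟩
        show idx = _
        rw [hk, hidx]
        rfl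
      · apply (pvStartsAt_iff s piece i hi).mpr
        exact ⟨by omega, by rw [hplen, ← hpiece]⟩
      · intro b hb hpb
        obtain ⟨hbm, -⟩ := (pvPairs_mem motifs b).mp hb
        obtain ⟨hroomb, hsliceb⟩ := (pvStartsAt_iff s b.1 i hi).mp hpb
        by_contra hgt
        rw [not_le] at hgt
        simp only [hplen] at hgt
        have hbLmem : b.1.length ∈ pvLengthsOf motifs :=
          (pvLengths_mem motifs b.1.length).mpr ⟨b.1, hbm, rfl⟩
        have hnone := hmax b.1.length hbLmem hgt hroomb
        rw [hsliceb, pvDict_get] at hnone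
        cases hix : PySem.List.index? motifs b.1 with
        | none => exact absurd hbm ((PySem.List.index?_eq_none_iff motifs b.1).mp hix)
        | some k' => rw [hix] at hnone; cases hnone
      · intro b hb hpb hkb
        obtain ⟨hbm, hbi⟩ := (pvPairs_mem motifs b).mp hb
        obtain ⟨hroomb, hsliceb⟩ := (pvStartsAt_iff s b.1 i hi).mp hpb
        simp only [hplen] at hkb
        have hb1 : b.1 = piece := by
          conv_lhs => rw [← hsliceb]
          rw [hkb, ← hpiece]
        cases b
        simp only at hb1 hbi
        subst hb1
        simp only [Prod.mk.injEq, true_and]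
        rw [hbi, hidx, hk]
        rfl
    rw [hfind]
    simp [hplen]

-- the two repeat-extension loops agree (the motif is nonempty under Pre_)
lemma pvRun_eq (s piece : List Char) (hne : piece ≠ []) :
    ∀ fuel j, pvRunA s piece s.length fuel j = pvRunB s piece piece.length fuel j := by
  intro fuel
  induction fuel with
  | zero => intro j; rfl
  | succ fuel ih =>
    intro j
    unfold pvRunA pvRunB
    have h1 : 1 ≤ piece.length := by
      cases piece with
      | nil => exact absurd rfl hne
      | cons c cs => simp
    have hcond : (decide (j < s.length) && pvStartsAt s piece j) = true ↔
        PySem.Chars.slice s (some (j : Int)) (some ((j + piece.length : Nat) : Int)) = piece := by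
      constructor
      · intro h
        obtain ⟨hjn, hsw⟩ := (by simpa using h : decide (j < s.length) = true ∧ pvStartsAt s piece j = true)
        have hj : j < s.length := of_decide_eq_true hjn
        exact ((pvStartsAt_iff s piece j (by omega)).mp hsw).2
      · intro h
        have hroom := pvSlice_room s piece j piece.length rfl h1 h
        have hsw : pvStartsAt s piece j = true :=
          (pvStartsAt_iff s piece j (by omega)).mpr ⟨hroom, h⟩
        simp [hsw]
        omega
    by_cases hc : PySem.Chars.slice s (some (j : Int)) (some ((j + piece.length : Nat) : Int)) = piece
    · rw [if_pos (hcond.mpr hc), if_pos hc, ih]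
    · rw [if_neg (fun h => hc (hcond.mp h)), if_neg hc]

-- the outer loops run in lockstep, B formatting each segment as it is produced
lemma pvLoop_eq (s : List Char) (motifs : List (List Char)) (hne : ∀ m ∈ motifs, m ≠ []) :
    ∀ fuel i acc,
      pvLoopB s (pvDictOf motifs) (pvLengthsOf motifs) s.length fuel i (acc.map pvFmt)
        = (pvLoopA s (pvPairsOf motifs) s.length fuel i acc).map pvFmt := by
  intro fuel
  induction fuel with
  | zero => intro i acc; rfl
  | succ fuel ih =>
    intro i acc
    unfold pvLoopA pvLoopB
    by_cases hin : i < s.length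
    · rw [if_pos hin, if_pos hin]
      rw [pvStep_eq s motifs i (by omega)]
      cases hf : (pvPairsOf motifs).find? (fun p => pvStartsAt s p.1 i) with
      | none => exact ih (i + 1) acc
      | some q =>
        obtain ⟨motif, idx⟩ := q
        simp only [Option.map_some]
        have hmm : motif ∈ motifs :=
          ((pvPairs_mem motifs (motif, idx)).mp (List.mem_of_find?_eq_some hf)).1
        rw [← pvRun_eq s motif (hne motif hmm)]
        have hnext := ih (pvRunA s motif s.length (s.length + 1) (i + motif.length))
          (acc ++ [(idx, i, pvRunA s motif s.length (s.length + 1) (i + motif.length))])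
        rw [List.map_append] at hnext
        exact hnext
    · rw [if_neg hin, if_neg hin]

-- ===== VERDICT (by name: the statement is the Claim_ definition above) =====
theorem rc_segmentation_spec : Claim_equal_rc_segmentation := by
  intro seq motifs_str _ hpre
  unfold Spec_rc_segmentation rc_segmentation rc_segmentation_alt
  by_cases hseq : seq = ""
  · simp [hseq]
  · by_cases hms : motifs_str = ""
    · simp [hms]
    · have hg : (seq = "" || motifs_str = "") = false := by simp [hseq, hms]
      simp only [hg, Bool.false_eq_true, if_false]
      have hne : ∀ m ∈ PySem.Chars.splitOn motifs_str.toList [','], m ≠ [] := by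
        rcases hpre with h | h | h
        · exact absurd h hseq
        · exact absurd h hms
        · intro m hm hmeq; exact h (hmeq ▸ hm)
      have hloop := pvLoop_eq seq.toList (PySem.Chars.splitOn motifs_str.toList [',']) hne
        (seq.toList.length + 1) 0 []
      simp only [List.map_nil] at hloop
      rw [hloop]
      generalize pvLoopA seq.toList (pvPairsOf (PySem.Chars.splitOn motifs_str.toList [',']))
          seq.toList.length (seq.toList.length + 1) 0 [] = ms' at *
      cases ms' with
      | nil => rfl
      | cons x xs => simp
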